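-- pv_equiv track=rewrite | github.com/larriera/uba-intprogramacion | guia7.py | pos_minimo
-- ===== SOURCE A (Python) =====
-- def minimo(s: list[int]) -> int:
--     min: int = s[0]
--     for i in range(len(s)):
--         if s[i] < min:
--             min = s[i]
--     return min
--
-- def pos_minimo(s: list[int]) -> int:
--     pos: int = -1
--     i: int = 0
--     while i < len(s):
--         if s[i] == minimo(s):
--             pos = i
--         i += 1
--     return pos
-- ===== SOURCE B (Python) =====
-- def pos_minimo(s: list[int]) -> int:
--     pos = -1
--     for i in range(len(s)):
--         if pos == -1 or s[i] <= s[pos]: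
--             pos = i
--     return pos
-- ===== Notes on version B (the rewrite author's own statement) =====
-- stated objective: faster
-- what changed: B fuses everything into one pass that keeps the running minimum's position (updating on <= to keep the last occurrence), instead of A's loop that recomputes the global minimum with a full scan at every iteration.
import Mathlib
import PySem

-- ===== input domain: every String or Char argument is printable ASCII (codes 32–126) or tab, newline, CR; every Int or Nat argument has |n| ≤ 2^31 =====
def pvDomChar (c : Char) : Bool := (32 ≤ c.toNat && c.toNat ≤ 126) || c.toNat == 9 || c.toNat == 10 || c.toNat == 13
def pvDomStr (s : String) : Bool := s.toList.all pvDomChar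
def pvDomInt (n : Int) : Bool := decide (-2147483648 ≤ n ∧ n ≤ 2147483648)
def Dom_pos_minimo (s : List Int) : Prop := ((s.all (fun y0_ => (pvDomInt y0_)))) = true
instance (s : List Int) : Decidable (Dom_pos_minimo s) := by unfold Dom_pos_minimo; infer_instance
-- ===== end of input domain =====

-- B replaces A's quadratic loop (a full minimum scan per element) by one fused pass
-- that tracks the running minimum's position; last occurrence on ties, -1 on [].

-- ===== PORT A =====
-- indices come from range(len(s)), so s[i] is always in range and pyGetD with default 0 is exact;
-- minimo is only ever called by pos_minimo with s nonempty, where pyGetD s 0 0 = s[0] exactly.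
def minimo (s : List Int) : Int :=
  (PySem.List.pyRange 0 (s.length : Int) 1).foldl
    (fun m i => if PySem.List.pyGetD s i 0 < m then PySem.List.pyGetD s i 0 else m)
    (PySem.List.pyGetD s 0 0)

def pos_minimo (s : List Int) : Int :=
  (PySem.List.pyRange 0 (s.length : Int) 1).foldl
    (fun pos i => if PySem.List.pyGetD s i 0 = minimo s then i else pos) (-1)

-- ===== PORT B =====
def pos_minimo_alt (s : List Int) : Int :=
  (PySem.List.pyRange 0 (s.length : Int) 1).foldl
    (fun pos i => if pos = -1 ∨ PySem.List.pyGetD s i 0 ≤ PySem.List.pyGetD s pos 0 then i else pos)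
    (-1)

-- ===== PRECONDITION & SPEC =====
def Spec_pos_minimo (s : List Int) (out : Int) : Prop := out = pos_minimo_alt s
instance (s : List Int) (out : Int) : Decidable (Spec_pos_minimo s out) := by unfold Spec_pos_minimo; infer_instance

-- ===== CLAIM (what is proved, stated in full; the proofs are below) =====
def Claim_equal_pos_minimo : Prop := ∀ (s : List Int), Dom_pos_minimo s → Spec_pos_minimo s (pos_minimo s)

-- ===== LEMMAS AND PROOFS =====

-- peel the last index off a fold over range(0, n+1)
theorem fold_range_succ {α : Type} (f : α → Int → α) (init : α) (n : ℕ) :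
    (PySem.List.pyRange 0 ((n + 1 : ℕ) : Int) 1).foldl f init
      = f ((PySem.List.pyRange 0 (n : Int) 1).foldl f init) (n : Int) := by
  rw [show ((n + 1 : ℕ) : Int) = (n : Int) + 1 by push_cast; ring,
    PySem.List.pyRange_one_succ_right (by omega)]
  simp

-- minimo s is a lower bound of s and is attained, for nonempty s
theorem foldl_min_le (t : List Int) (a : Int) :
    (t.foldl (fun m v => if v < m then v else m) a) ≤ a ∧
    ∀ v ∈ t, (t.foldl (fun m v => if v < m then v else m) a) ≤ v := by
  induction t generalizing a with
  | nil => simp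
  | cons x ts ih =>
    have h1 := ih (if x < a then x else a)
    simp only [List.foldl_cons]
    refine ⟨le_trans h1.1 (by split <;> omega), ?_⟩
    intro v hv
    rcases List.mem_cons.mp hv with h | h
    · subst h; exact le_trans h1.1 (by split <;> omega)
    · exact h1.2 v h

theorem foldl_min_mem (t : List Int) (a : Int) :
    (t.foldl (fun m v => if v < m then v else m) a) = a ∨
    (t.foldl (fun m v => if v < m then v else m) a) ∈ t := by
  induction t generalizing a with
  | nil => simp
  | cons x ts ih =>
    rcases ih (if x < a then x else a) with h | h
    · simp only [List.foldl_cons, h]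
      split_ifs <;> simp_all
    · simp only [List.foldl_cons]
      right; exact List.mem_cons_of_mem _ h

theorem minimo_eq_foldl (s : List Int) :
    minimo s = s.foldl (fun m v => if v < m then v else m) (s.getD 0 0) := by
  unfold minimo
  rw [PySem.List.foldl_pyRange_zero_pyGetD' s 0 (fun m v => if v < m then v else m)]
  simp [PySem.List.pyGetD_zero, List.getD]

theorem minimo_le (s : List Int) : ∀ v ∈ s, minimo s ≤ v := by
  intro v hv
  rw [minimo_eq_foldl]
  exact (foldl_min_le s (s.getD 0 0)).2 v hv

theorem minimo_mem (s : List Int) (hs : s ≠ []) : minimo s ∈ s := by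
  rw [minimo_eq_foldl]
  rcases foldl_min_mem s (s.getD 0 0) with h | h
  · rw [h]
    cases s with
    | nil => exact absurd rfl hs
    | cons x ts => simp
  · exact h

theorem minimo_le_getD (s : List Int) (k : ℕ) (hk : k < s.length) :
    minimo s ≤ s.getD k 0 := by
  have : s.getD k 0 ∈ s := by
    rw [List.getD_eq_getElem s 0 hk]; exact List.getElem_mem hk
  exact minimo_le s _ this

-- the joint loop invariant after n iterations (1 ≤ n ≤ len s)
theorem joint_inv (s : List Int) (n : ℕ) (h1 : 1 ≤ n) (hn : n ≤ s.length) :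
    ∃ b : ℕ, b < n ∧
      ((PySem.List.pyRange 0 (n : Int) 1).foldl
        (fun pos i => if pos = -1 ∨ PySem.List.pyGetD s i 0 ≤ PySem.List.pyGetD s pos 0 then i else pos)
        (-1)) = (b : Int) ∧
      (∀ k : ℕ, k < n → s.getD b 0 ≤ s.getD k 0) ∧
      ((PySem.List.pyRange 0 (n : Int) 1).foldl
        (fun pos i => if PySem.List.pyGetD s i 0 = minimo s then i else pos)
        (-1)) = (if s.getD b 0 = minimo s then (b : Int) else -1) := by
  induction n with
  | zero => omega
  | succ n ih =>
    by_cases hn1 : 1 ≤ n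
    · obtain ⟨b, hb, hB, hmin, hA⟩ := ih hn1 (by omega)
      rw [fold_range_succ, fold_range_succ, hB, hA]
      simp only [PySem.List.pyGetD_natCast]
      by_cases hle : s.getD n 0 ≤ s.getD b 0
      · -- B updates to n
        refine ⟨n, by omega, ?_, ?_, ?_⟩
        · rw [if_pos (Or.inr hle)]
        · intro k hk
          rcases Nat.lt_or_ge k n with h | h
          · exact le_trans hle (hmin k h)
          · have : k = n := by omega
            simp [this]
        · by_cases heq : s.getD n 0 = minimo s
          · rw [if_pos heq, if_pos heq]
          · rw [if_neg heq, if_neg heq]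
            -- s[n] < minimum of prefix, so prefix min ≠ global min would give s[n] < global min
            have hmn : minimo s ≤ s.getD n 0 := minimo_le_getD s n (by omega)
            have hbm : minimo s ≤ s.getD b 0 := minimo_le_getD s b (by omega)
            have : ¬ s.getD b 0 = minimo s := by omega
            rw [if_neg this]
      · -- B keeps b
        have hcond : ¬ ((b : Int) = -1 ∨ s.getD n 0 ≤ s.getD b 0) := by
          rintro (h | h) <;> omega
        refine ⟨b, by omega, by rw [if_neg hcond], ?_, ?_⟩
        · intro k hk
          rcases Nat.lt_or_ge k n with h | h
          · exact hmin k h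
          · have : k = n := by omega
            subst this; omega
        · have heq : ¬ s.getD n 0 = minimo s := by
            have hbm : minimo s ≤ s.getD b 0 := minimo_le_getD s b (by omega)
            omega
          rw [if_neg heq]
    · -- n = 0, so n+1 = 1: one iteration from pos = -1
      have h0 : n = 0 := by omega
      subst h0
      refine ⟨0, by omega, ?_, by intro k hk; interval_cases k; rfl, ?_⟩
      · rw [fold_range_succ]
        simp [PySem.List.pyRange, PySem.List.pyGetD_zero, List.getD]
      · rw [fold_range_succ]
        simp [PySem.List.pyRange, PySem.List.pyGetD_zero, List.getD]
-- ===== VERDICT (by name: the statement is the Claim_ definition above) =====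
theorem pos_minimo_spec : Claim_equal_pos_minimo := by
  intro s _
  unfold Spec_pos_minimo pos_minimo pos_minimo_alt
  by_cases hne : s = []
  · subst hne; simp
  · have hlen : 1 ≤ s.length := by
      cases s with
      | nil => exact absurd rfl hne
      | cons x ts => simp
    obtain ⟨b, hb, hB, hmin, hA⟩ := joint_inv s s.length hlen le_rfl
    rw [hB, hA]
    -- at the end the prefix is the whole list, so its minimum is the global minimum
    obtain ⟨k, hk, hkv⟩ := List.mem_iff_getElem.mp (minimo_mem s hne)
    have hbm : minimo s ≤ s.getD b 0 := minimo_le_getD s b hb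
    have hkb : s.getD b 0 ≤ minimo s := by
      have := hmin k hk
      rwa [List.getD_eq_getElem s 0 hk, hkv] at this
    rw [if_pos (by omega)]
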